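-- pv_equiv track=rewrite | github.com/Josh-Abbott/355-HW3 | HW3.py | aggregate_log
-- ===== SOURCE A (Python) =====
-- def aggregate_log(data):
--      log_output = {}
--      for class_id, weekly_data in data.items():
--           for day, study_time in weekly_data.items():
--                if day not in log_output:
--                     log_output[day] = 0
--                log_output[day] += study_time
--      return log_output
-- ===== SOURCE B (Python) =====
-- def aggregate_log(data):
--     days = []
--     seen = set()
--     for weekly_data in data.values():
--         for day in weekly_data:
--             if day not in seen:
--                 seen.add(day)
--                 days.append(day)
--     return {day: sum(weekly_data.get(day, 0) for weekly_data in data.values())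
--             for day in days}
-- ===== Notes on version B (the rewrite author's own statement) =====
-- stated objective: alternative
-- what changed: Instead of one accumulating pass that updates a running totals dict per entry, B first collects the distinct day keys in first-seen order and then computes each day's total by scanning all classes with weekly.get(day, 0).
import Mathlib
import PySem

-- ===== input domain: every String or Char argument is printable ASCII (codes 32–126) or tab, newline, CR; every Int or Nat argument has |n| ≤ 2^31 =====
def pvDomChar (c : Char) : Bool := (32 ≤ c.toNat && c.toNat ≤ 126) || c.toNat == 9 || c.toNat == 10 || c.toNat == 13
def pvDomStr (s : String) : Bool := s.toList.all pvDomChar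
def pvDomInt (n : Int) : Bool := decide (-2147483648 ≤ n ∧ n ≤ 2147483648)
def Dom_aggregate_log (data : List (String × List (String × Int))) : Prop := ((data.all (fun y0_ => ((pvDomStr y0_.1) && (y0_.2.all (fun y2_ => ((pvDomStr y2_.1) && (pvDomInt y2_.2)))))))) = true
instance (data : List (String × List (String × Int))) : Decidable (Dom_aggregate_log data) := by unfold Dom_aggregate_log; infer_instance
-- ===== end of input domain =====

-- B replaces A's single accumulating dict pass by collecting the distinct day keys first and
-- then totalling each day with a scan over all classes (alternative decomposition, same results).


-- ===== PORT A =====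
def aggregate_log (data : List (String × List (String × Int))) : List (String × Int) :=
  (data.foldl (fun log_output cw =>
      cw.2.foldl (fun log_output p =>
        let log_output := if log_output.contains p.1 then log_output else log_output.insert p.1 0
        log_output.insert p.1 (log_output.getD p.1 0 + p.2)) log_output)
    PySem.Dict.empty).items

-- ===== PORT B =====
def aggregate_log_alt (data : List (String × List (String × Int))) : List (String × Int) :=
  -- st = (days, seen); B then maps over the collected days
  (data.foldl (fun st cw =>
      cw.2.foldl (fun st p =>
        if st.2.contains p.1 then st else (st.1 ++ [p.1], PySem.Set.add st.2 p.1)) st)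
    (([] : List String), (PySem.Set.empty : PySem.Set String))).1.map (fun day =>
    (day, data.foldl (fun t cw => t + (PySem.Dict.ofList cw.2).getD day 0) 0))

-- ===== PRECONDITION & SPEC =====
-- Pre_ states that the association lists are well-formed dict representations (no duplicate
-- keys, outer or inner): a Python dict cannot carry duplicate keys, so this excludes no input
-- the Python programs can receive.
def Pre_aggregate_log (data : List (String × List (String × Int))) : Prop :=
  (data.map Prod.fst).Nodup ∧ ∀ cw ∈ data, (cw.2.map Prod.fst).Nodup
instance (data : List (String × List (String × Int))) : Decidable (Pre_aggregate_log data) := by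
  unfold Pre_aggregate_log; infer_instance
def pvWitness_aggregate_log : (List (String × List (String × Int))) :=
  [("math", [("mon", 1), ("tue", 2)]), ("cs", [("mon", 3)])]
def Spec_aggregate_log (data : List (String × List (String × Int))) (out : List (String × Int)) : Prop := out = aggregate_log_alt data
instance (data : List (String × List (String × Int))) (out : List (String × Int)) : Decidable (Spec_aggregate_log data out) := by unfold Spec_aggregate_log; infer_instance

-- ===== CLAIM (what is proved, stated in full; the proofs are below) =====
def Claim_equal_aggregate_log : Prop := ∀ (data : List (String × List (String × Int))), Dom_aggregate_log data → Pre_aggregate_log data → Spec_aggregate_log data (aggregate_log data)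

-- ===== LEMMAS AND PROOFS =====

-- A's inner-loop body ("ensure key, then +=") is a single insert of the incremented value.
theorem stepA_eq (d : PySem.Dict String Int) (p : String × Int) :
    (let d1 := if d.contains p.1 then d else d.insert p.1 0
     d1.insert p.1 (d1.getD p.1 0 + p.2)) = d.insert p.1 (d.getD p.1 0 + p.2) := by
  by_cases h : d.contains p.1
  · simp [h]
  · simp only [Bool.not_eq_true] at h
    simp [h, PySem.Dict.getD_insert_self, PySem.Dict.insert_insert_self,
      PySem.Dict.getD_of_not_contains _ _ h]

-- Running A's accumulation over a pair list adds, per key, the sum of that key's values.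
theorem getD_foldl_insert_add (l : List (String × Int)) (d : PySem.Dict String Int) (k : String) :
    (l.foldl (fun d p => d.insert p.1 (d.getD p.1 0 + p.2)) d).getD k 0
      = d.getD k 0 + ((l.filter (fun p => p.1 == k)).map Prod.snd).sum := by
  induction l generalizing d with
  | nil => simp
  | cons p t ih =>
    simp only [List.foldl_cons, ih, PySem.Dict.getD_insert, List.filter_cons]
    by_cases hk : k = p.1
    · subst hk; simp; ring
    · simp [hk, Ne.symm hk, beq_iff_eq]

-- Looking up in a dict built from pairs folds to the (unique-or-absent) value of that key.
theorem filter_key_eq_nil (t : List (String × Int)) (k : String)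
    (h : k ∉ t.map Prod.fst) : t.filter (fun p => p.1 == k) = [] := by
  rw [List.filter_eq_nil_iff]
  intro x hx hbe
  have hx1 : x.1 = k := by simpa using hbe
  exact h (hx1 ▸ List.mem_map_of_mem hx)

theorem getD_foldl_pairs (l : List (String × Int)) (h : (l.map Prod.fst).Nodup)
    (d : PySem.Dict String Int) (k : String) :
    (l.foldl (fun acc p => acc.insert p.1 p.2) d).getD k 0
      = if k ∈ l.map Prod.fst then ((l.filter (fun p => p.1 == k)).map Prod.snd).sum
        else d.getD k 0 := by
  induction l generalizing d with
  | nil => simp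
  | cons p t ih =>
    simp only [List.map_cons, List.nodup_cons] at h
    simp only [List.foldl_cons, ih h.2, List.map_cons, List.mem_cons, List.filter_cons]
    by_cases hk : k = p.1
    · subst hk
      have hnt := filter_key_eq_nil t p.1 h.1
      simp [hnt, h.1, PySem.Dict.getD_insert_self]
    · simp only [PySem.Dict.getD_insert, if_neg hk]
      by_cases hm : k ∈ t.map Prod.fst <;> simp [hm, hk, Ne.symm hk]

-- A dict built from a duplicate-free pair list looks up, at any key, the sum of that key's
-- values in the list (the single value, or 0 when absent).
theorem getD_ofList_eq_sum (l : List (String × Int)) (h : (l.map Prod.fst).Nodup) (k : String) :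
    (PySem.Dict.ofList l).getD k 0 = ((l.filter (fun p => p.1 == k)).map Prod.snd).sum := by
  rw [PySem.Dict.ofList, PySem.Dict.update, getD_foldl_pairs l h]
  by_cases hm : k ∈ l.map Prod.fst
  · simp [hm]
  · simp [hm, filter_key_eq_nil l k hm]

-- B's days/seen pair stays two copies of the same Set.add fold.
theorem collect_pair (l : List (String × Int)) (s : PySem.Set String) :
    l.foldl (fun st p =>
        if st.2.contains p.1 then st else (st.1 ++ [p.1], PySem.Set.add st.2 p.1)) (s, s)
      = (l.foldl (fun s p => PySem.Set.add s p.1) s,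
         l.foldl (fun s p => PySem.Set.add s p.1) s) := by
  induction l generalizing s with
  | nil => rfl
  | cons p t ih =>
    by_cases h : s.contains p.1
    · have h1 : PySem.Set.add s p.1 = s := by rw [PySem.Set.add, if_pos h]
      simp only [List.foldl_cons, h, if_true, h1]
      exact ih s
    · have h1 : PySem.Set.add s p.1 = s ++ [p.1] := by rw [PySem.Set.add, if_neg h]
      simp only [List.foldl_cons, Bool.not_eq_true] at *
      simp only [h, h1]
      exact ih (s ++ [p.1])

-- ===== VERDICT (by name: the statement is the Claim_ definition above) =====
-- Both programs as maps over the same key list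
theorem aggregate_log_spec : Claim_equal_aggregate_log := by
  intro data _hdom hpre
  obtain ⟨_houter, hinner⟩ := hpre
  unfold Spec_aggregate_log aggregate_log aggregate_log_alt
  set pairs : List (String × Int) := data.flatMap (·.2) with hpairs
  -- A side: flatten the nested fold, normalise the body to a single insert
  have hbody : (fun (log_output : PySem.Dict String Int) (p : String × Int) =>
        let log_output := if log_output.contains p.1 then log_output else log_output.insert p.1 0
        log_output.insert p.1 (log_output.getD p.1 0 + p.2))
      = fun d p => d.insert p.1 (d.getD p.1 0 + p.2) := by
    funext d p; exact stepA_eq d p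
  rw [hbody, ← List.foldl_flatMap]
  -- B side: flatten the key-collection fold, collapse the pair to one Set.ofList fold
  have hflatB := (List.foldl_flatMap (l := data)
      (f := fun cw : String × List (String × Int) => cw.2)
      (g := fun (st : List String × PySem.Set String) (p : String × Int) =>
        if st.2.contains p.1 then st else (st.1 ++ [p.1], PySem.Set.add st.2 p.1))
      (init := (([] : List String), (PySem.Set.empty : PySem.Set String)))).symm
  rw [hflatB]
  have hdays : (pairs.foldl (fun st p =>
        if st.2.contains p.1 then st else (st.1 ++ [p.1], PySem.Set.add st.2 p.1))
        (([] : List String), (PySem.Set.empty : PySem.Set String))).1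
      = PySem.Set.ofList (pairs.map Prod.fst) := by
    rw [show (PySem.Set.empty : PySem.Set String) = ([] : List String) from rfl,
        collect_pair, PySem.Set.ofList_eq_foldl, List.foldl_map]
  rw [hdays]
  -- A's dict as a map over its (nodup) keys
  have hnodup := PySem.Dict.nodup_keys_foldl_insert_key pairs Prod.fst
      (fun d p => d.getD p.1 0 + p.2) PySem.Dict.empty (by simp)
  rw [PySem.Dict.items_eq_map_keys _ hnodup 0,
      PySem.Dict.keys_foldl_insert_key pairs Prod.fst (fun d p => d.getD p.1 0 + p.2)]
  have hkeys : PySem.Set.update (PySem.Dict.empty (κ := String) (ν := Int)).keys (pairs.map Prod.fst)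
      = PySem.Set.ofList (pairs.map Prod.fst) := by
    rw [PySem.Set.ofList_eq_foldl]; rfl
  rw [hkeys]
  -- pointwise equality of the two map functions
  refine List.map_congr_left ?_
  intro day _hday
  refine Prod.ext rfl ?_
  show (pairs.foldl (fun d p => d.insert p.1 (d.getD p.1 0 + p.2)) PySem.Dict.empty).getD day 0
      = data.foldl (fun t cw => t + (PySem.Dict.ofList cw.2).getD day 0) 0
  rw [getD_foldl_insert_add, PySem.List.foldl_add]
  have hmapc : data.map (fun cw => (PySem.Dict.ofList cw.2).getD day 0)
      = data.map (fun cw => ((cw.2.filter (fun p => p.1 == day)).map Prod.snd).sum) :=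
    List.map_congr_left (fun cw hcw => getD_ofList_eq_sum cw.2 (hinner cw hcw) day)
  rw [hmapc, hpairs, List.filter_flatMap, List.map_flatMap]
  simp only [List.flatMap, List.sum_flatten, List.map_map]
  rfl
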